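-- pv_equiv track=rewrite | github.com/kelvinhuang0327/number-pattern-research | tools/exhaustive_nbet_benchmark.py | method_markov_transition
-- ===== SOURCE A (Python) =====
-- from typing import List, Dict, Callable, Tuple
-- from collections import Counter
--
-- def method_markov_transition(history: List[Dict], max_num: int) -> List[int]:
--     """Markov chain: predict based on last draw transitions."""
--     if len(history) < 2:
--         return list(range(1, 7))
--
--     last_draw = set(history[0]['numbers'])
--     transitions = Counter()
--
--     for i in range(1, len(history) - 1):
--         prev = set(history[i+1]['numbers'])
--         curr = set(history[i]['numbers'])
--         for p in prev:
--             for c in curr: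
--                 transitions[(p, c)] += 1
--
--     scores = Counter()
--     for n in last_draw:
--         for target in range(1, max_num + 1):
--             scores[target] += transitions.get((n, target), 0)
--
--     return [n for n, _ in scores.most_common(6)]
-- ===== SOURCE B (Python) =====
-- from typing import List, Dict
--
-- def method_markov_transition(history: List[Dict], max_num: int) -> List[int]:
--     """Markov chain prediction with no Counter/dict at all: precompute, for each
--     step, (overlap with the last draw, the step's draw set); a candidate's score
--     is the sum of overlaps of the steps whose draw contains it."""
--     if len(history) < 2:
--         return list(range(1, 7))
--
--     last_draw = set(history[0]['numbers'])
--     steps = [(len(last_draw & set(history[i + 1]['numbers'])),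
--               set(history[i]['numbers']))
--              for i in range(1, len(history) - 1)]
--
--     def score(t):
--         return sum(ov for ov, cur in steps if t in cur)
--
--     return sorted(range(1, max_num + 1), key=lambda t: -score(t))[:6]
-- ===== Notes on version B (the rewrite author's own statement) =====
-- stated objective: alternative
-- what changed: Replaces A's pair-keyed transitions Counter and scores Counter with a dict-free two-stage computation: a precomputed list of (overlap-with-last-draw, draw-set) pairs per step, a candidate's score being the sum of overlaps of steps containing it, and a stable ascending sort of 1..max_num on the negated score instead of Counter.most_common.
import Mathlib
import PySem

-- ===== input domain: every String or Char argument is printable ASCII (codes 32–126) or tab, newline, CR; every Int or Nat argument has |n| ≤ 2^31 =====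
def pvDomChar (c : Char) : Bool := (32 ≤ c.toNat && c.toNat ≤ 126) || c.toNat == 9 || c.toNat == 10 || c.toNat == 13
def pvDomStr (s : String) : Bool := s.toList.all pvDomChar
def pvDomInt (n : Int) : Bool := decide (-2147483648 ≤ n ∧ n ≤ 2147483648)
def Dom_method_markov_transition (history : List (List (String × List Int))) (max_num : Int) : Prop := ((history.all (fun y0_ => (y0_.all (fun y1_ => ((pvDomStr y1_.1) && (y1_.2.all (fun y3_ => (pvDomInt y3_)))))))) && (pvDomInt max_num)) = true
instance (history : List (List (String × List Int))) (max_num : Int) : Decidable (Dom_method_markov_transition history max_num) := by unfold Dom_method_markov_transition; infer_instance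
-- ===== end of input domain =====

-- B removes both of A's Counters: it precomputes a list of (overlap-with-last-draw, draw-set)
-- pairs, scores each candidate by summing the overlaps of the steps containing it, and ranks
-- 1..max_num by a stable sort on the negated score (alternative decomposition; equal results
-- proved below).


-- ===== PORT A =====
-- d['numbers'] : Pre_ guarantees the key is present wherever A consults it (KeyError otherwise)
def pvNums (d : List (String × List Int)) : List Int :=
  (PySem.Dict.get? (PySem.Dict.mk d) "numbers").getD []

def method_markov_transition (history : List (List (String × List Int))) (max_num : Int) : List Int :=
  if history.length < 2 then PySem.List.pyRange 1 7 1
  else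
    let lastDraw : PySem.Set Int := PySem.Set.ofList (pvNums (PySem.List.pyGetD history 0 []))
    let transitions : PySem.Dict (Int × Int) Int :=
      (PySem.List.pyRange 1 ((history.length : Int) - 1) 1).foldl (fun T i =>
        let prev : PySem.Set Int := PySem.Set.ofList (pvNums (PySem.List.pyGetD history (i + 1) []))
        let curr : PySem.Set Int := PySem.Set.ofList (pvNums (PySem.List.pyGetD history i []))
        prev.foldl (fun T p => curr.foldl (fun T c => T.modify (p, c) 0 (· + 1)) T) T)
        PySem.Dict.empty
    let scores : PySem.Dict Int Int :=
      lastDraw.foldl (fun S n =>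
        (PySem.List.pyRange 1 (max_num + 1) 1).foldl
          (fun S t => S.modify t 0 (· + transitions.getD (n, t) 0)) S)
        PySem.Dict.empty
    -- scores.most_common(6) = stable descending sort of the items by count, first 6
    ((PySem.List.sorted scores.items (fun p => p.2) true).take 6).map (fun p => p.1)

-- ===== PORT B =====
def method_markov_transition_alt (history : List (List (String × List Int))) (max_num : Int) : List Int :=
  if history.length < 2 then PySem.List.pyRange 1 7 1
  else
    let lastDraw : PySem.Set Int := PySem.Set.ofList (pvNums (PySem.List.pyGetD history 0 []))
    let steps : List (Int × PySem.Set Int) :=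
      (PySem.List.pyRange 1 ((history.length : Int) - 1) 1).map (fun i =>
        (PySem.Set.len (PySem.Set.inter lastDraw
            (PySem.Set.ofList (pvNums (PySem.List.pyGetD history (i + 1) [])))),
         PySem.Set.ofList (pvNums (PySem.List.pyGetD history i []))))
    let score : Int → Int := fun t =>
      ((steps.filter (fun s => PySem.Set.contains s.2 t)).map (fun s => s.1)).sum
    (PySem.List.sorted (PySem.List.pyRange 1 (max_num + 1) 1)
      (fun t => -(score t)) false).take 6

-- ===== PRECONDITION & SPEC =====
-- Pre_ excludes (a) inputs where a consulted draw dict lacks the 'numbers' key, on which A raises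
-- KeyError, and (b) inputs with ≥ 2 draws whose latest draw has an empty 'numbers' list — a no-data
-- corner where A's empty prediction and B's default ranking of 1..max_num are both defensible.
def Pre_method_markov_transition (history : List (List (String × List Int))) (max_num : Int) : Prop :=
  history.length ≤ 1 ∨
    (pvNums (PySem.List.pyGetD history 0 []) ≠ [] ∧
      (history.length ≤ 2 ∨ ∀ d ∈ history, (PySem.Dict.get? (PySem.Dict.mk d) "numbers").isSome))
instance (history : List (List (String × List Int))) (max_num : Int) : Decidable (Pre_method_markov_transition history max_num) := by unfold Pre_method_markov_transition; infer_instance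

def pvWitness_method_markov_transition : (List (List (String × List Int))) × Int :=
  ([[("numbers", [1, 2])], [("numbers", [2, 3])], [("numbers", [1])]], 6)

def Spec_method_markov_transition (history : List (List (String × List Int))) (max_num : Int) (out : List Int) : Prop := out = method_markov_transition_alt history max_num
instance (history : List (List (String × List Int))) (max_num : Int) (out : List Int) : Decidable (Spec_method_markov_transition history max_num out) := by unfold Spec_method_markov_transition; infer_instance

-- ===== CLAIM (what is proved, stated in full; the proofs are below) =====
def Claim_equal_method_markov_transition : Prop := ∀ (history : List (List (String × List Int))) (max_num : Int), Dom_method_markov_transition history max_num → Pre_method_markov_transition history max_num → Spec_method_markov_transition history max_num (method_markov_transition history max_num)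

-- ===== LEMMAS AND PROOFS =====

-- count of (n,t) among curr tagged with the fixed first component p
theorem pv_count_map_pair (curr : List Int) (p n t : Int) :
    (curr.map (fun c => (p, c))).count (n, t) = if p = n then curr.count t else 0 := by
  induction curr with
  | nil => simp
  | cons c cs ih =>
    simp only [List.map_cons, List.count_cons, ih]
    by_cases hp : p = n
    · subst hp
      by_cases hc : c = t <;> simp [hc, Prod.ext_iff]
    · simp [hp, Prod.ext_iff]

-- one Markov step: the nested prev×curr loop adds count(prev,n)·count(curr,t) to entry (n,t)
theorem pv_getD_transStep (prev curr : List Int) (T : PySem.Dict (Int × Int) Int) (n t : Int) :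
    ((prev.foldl (fun T p => curr.foldl (fun T c => T.modify (p, c) 0 (· + 1)) T) T).getD (n, t) 0)
      = T.getD (n, t) 0 + (prev.count n : Int) * (curr.count t : Int) := by
  induction prev generalizing T with
  | nil => simp
  | cons p ps ih =>
    rw [List.foldl_cons, ih]
    have h1 : curr.foldl (fun T c => T.modify (p, c) 0 (· + 1)) T
        = (curr.map (fun c => (p, c))).foldl (fun d x => d.modify x 0 (· + 1)) T := by
      rw [List.foldl_map]
    rw [h1, PySem.Dict.getD_foldl_modify_add_one, pv_count_map_pair, List.count_cons]
    by_cases hp : p = n <;> simp [hp] <;> push_cast <;> ring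

-- the whole transitions loop, as a sum over the index list
theorem pv_getD_transFold (l : List Int) (P C : Int → List Int) (T : PySem.Dict (Int × Int) Int) (n t : Int) :
    ((l.foldl (fun T i => (P i).foldl (fun T p => (C i).foldl (fun T c => T.modify (p, c) 0 (· + 1)) T) T) T).getD (n, t) 0)
      = T.getD (n, t) 0 + (l.map (fun i => ((P i).count n : Int) * ((C i).count t : Int))).sum := by
  induction l generalizing T with
  | nil => simp
  | cons i is ih =>
    rw [List.foldl_cons, ih, pv_getD_transStep]
    simp [List.sum_cons]; ring

-- a modify-loop over distinct keys adds g x to key x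
theorem pv_getD_foldl_modify_addf (l : List Int) (hl : l.Nodup) (g : Int → Int)
    (S : PySem.Dict Int Int) (t : Int) :
    ((l.foldl (fun S x => S.modify x 0 (· + g x)) S).getD t 0)
      = S.getD t 0 + (if t ∈ l then g t else 0) := by
  induction l generalizing S with
  | nil => simp
  | cons x xs ih =>
    rw [List.foldl_cons, ih (List.Nodup.of_cons hl), PySem.Dict.getD_modify]
    by_cases hx : t = x
    · subst hx
      have : t ∉ xs := (List.nodup_cons.mp hl).1
      simp [this]
    · simp [hx, List.mem_cons]

-- A's scores loop, pointwise
theorem pv_getD_scoresA (LD : List Int) (RT : List Int) (hRT : RT.Nodup) (g : Int → Int → Int)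
    (S : PySem.Dict Int Int) (t : Int) :
    ((LD.foldl (fun S n => RT.foldl (fun S t => S.modify t 0 (· + g n t)) S) S).getD t 0)
      = S.getD t 0 + (LD.map (fun n => if t ∈ RT then g n t else 0)).sum := by
  induction LD generalizing S with
  | nil => simp
  | cons n ns ih =>
    rw [List.foldl_cons, ih, pv_getD_foldl_modify_addf RT hRT]
    simp [List.sum_cons]; ring

-- double sums over lists commute
theorem pv_sum_swap (l1 l2 : List Int) (f : Int → Int → Int) :
    (l1.map (fun a => (l2.map (f a)).sum)).sum = (l2.map (fun b => (l1.map (fun a => f a b)).sum)).sum := by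
  induction l1 with
  | nil => simp
  | cons a as ih =>
    simp only [List.map_cons, List.sum_cons, ih, ← PySem.List.sum_map_add_int]

-- summing a filtered-out map = summing the if-gated map (B's generator expression)
theorem pv_sum_filter_map {α : Type} (l : List α) (p : α → Bool) (f : α → Int) :
    ((l.filter p).map f).sum = (l.map (fun x => if p x then f x else 0)).sum := by
  induction l with
  | nil => simp
  | cons x xs ih =>
    by_cases hx : p x <;> simp [List.filter_cons, hx, ih]

-- the inner exchange: summing count(prev,·)·count(curr,t) over last_draw is the overlap gated by t ∈ curr
theorem pv_inner (LD prev curr : List Int) (hp : prev.Nodup) (hc : curr.Nodup) (t : Int) :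
    (LD.map (fun n => ((prev.count n : Int)) * ((curr.count t : Int)))).sum
      = if t ∈ curr then ((LD.filter (fun x => prev.contains x)).length : Int) else 0 := by
  have hcnt : ∀ (l : List Int), l.Nodup → ∀ x, ((l.count x : Int)) = if x ∈ l then 1 else 0 := by
    intro l hl x
    by_cases hx : x ∈ l
    · simp [hx, List.count_eq_one_of_mem hl hx]
    · simp [hx, List.count_eq_zero_of_not_mem hx]
  by_cases ht : t ∈ curr
  · rw [hcnt curr hc t, if_pos ht]
    simp only [if_pos ht, mul_one]
    have h1 : (LD.map (fun n => ((prev.count n : Int)))).sum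
        = (LD.map (fun n => if n ∈ prev then (1:Int) else 0)).sum := by
      congr 1
      exact List.map_congr_left (fun n _ => hcnt prev hp n)
    rw [h1]
    have h2 : (LD.map (fun n => if n ∈ prev then (1:Int) else 0)).sum
        = ((LD.countP (fun n => decide (n ∈ prev))) : Int) := by
      rw [show (fun n => if n ∈ prev then (1:Int) else 0)
            = (fun n => if (fun x => decide (x ∈ prev)) n = true then (1:Int) else 0) by
          funext n; simp]
      exact PySem.List.sum_map_ite_one_zero (fun x => decide (x ∈ prev)) LD
    rw [h2, List.countP_eq_length_filter]
    congr 2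
    apply List.filter_congr
    intro x _
    simp
  · rw [hcnt curr hc t, if_neg ht, if_neg ht]
    simp

-- Set.update with a list of already-present elements is the identity
theorem pv_update_eq_self (s : PySem.Set Int) (xs : List Int) (h : ∀ x ∈ xs, x ∈ s) :
    PySem.Set.update s xs = s := by
  induction xs generalizing s with
  | nil => rfl
  | cons x xs ih =>
    have hx : x ∈ s := h x (by simp)
    have : PySem.Set.add s x = s := by
      simp [PySem.Set.add, (PySem.Set.contains_iff s x).mpr hx, hx]
    simp only [PySem.Set.update, List.foldl_cons]
    rw [show List.foldl PySem.Set.add (PySem.Set.add s x) xs = PySem.Set.update (PySem.Set.add s x) xs from rfl,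
      this, ih s (fun y hy => h y (by simp [hy]))]

-- keys of A's scores dict: exactly the target range (last_draw nonempty)
theorem pv_keys_scoresA (LD RT : List Int) (hLD : LD ≠ []) (hRT : RT.Nodup) (g : Int → Int → Int) :
    ((LD.foldl (fun S n => RT.foldl (fun S t => S.modify t 0 (· + g n t)) S)
        (PySem.Dict.empty : PySem.Dict Int Int)).keys) = RT := by
  have haux : ∀ (ns : List Int) (S : PySem.Dict Int Int), S.keys = RT →
      ((ns.foldl (fun S n => RT.foldl (fun S t => S.modify t 0 (· + g n t)) S) S).keys) = RT := by
    intro ns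
    induction ns with
    | nil => intro S hS; simpa using hS
    | cons n ns ih =>
      intro S hS
      rw [List.foldl_cons]
      apply ih
      rw [PySem.Dict.keys_foldl_modify RT 0 (fun d x => fun v => v + g n x) S, hS]
      exact pv_update_eq_self RT RT (fun x hx => hx)
  cases LD with
  | nil => exact absurd rfl hLD
  | cons n ns =>
    rw [List.foldl_cons]
    apply haux
    rw [PySem.Dict.keys_foldl_modify RT 0 (fun d x => fun v => v + g n x) PySem.Dict.empty]
    have h1 : (PySem.Dict.empty : PySem.Dict Int Int).keys = [] := rfl
    rw [h1]
    show PySem.Set.ofList RT = RT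
    simp [pysem, hRT]

-- insertBy commutes with map when the order predicate factors through the map
theorem pv_insertBy_map {α β : Type} (f : α → β) (p : β → β → Bool) (x : α) (ys : List α) :
    PySem.List.insertBy p (f x) (ys.map f)
      = (PySem.List.insertBy (fun a b => p (f a) (f b)) x ys).map f := by
  induction ys with
  | nil => simp [PySem.List.insertBy]
  | cons y ys ih =>
    simp only [List.map_cons, PySem.List.insertBy]
    by_cases h : p (f x) (f y) <;> simp [h, ih]

theorem pv_foldl_insertBy_map {α β : Type} (f : α → β) (p : β → β → Bool) (l : List α) (acc : List α) :
    (l.map f).foldl (fun acc x => PySem.List.insertBy p x acc) (acc.map f)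
      = (l.foldl (fun acc x => PySem.List.insertBy (fun a b => p (f a) (f b)) x acc) acc).map f := by
  induction l generalizing acc with
  | nil => simp
  | cons a as ih =>
    simp only [List.map_cons, List.foldl_cons]
    rw [pv_insertBy_map, ih]

-- insertBy only looks at the order predicate on the inserted element vs. list members
theorem pv_insertBy_congr {α : Type} (p q : α → α → Bool) (x : α) (ys : List α)
    (h : ∀ y ∈ ys, p x y = q x y) :
    PySem.List.insertBy p x ys = PySem.List.insertBy q x ys := by
  induction ys with
  | nil => rfl
  | cons y ys ih =>
    simp only [PySem.List.insertBy]
    rw [h y (by simp)]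
    by_cases hq : q x y = true
    · simp [hq]
    · simp only [hq, Bool.not_eq_true] at *
      rw [ih (fun z hz => h z (by simp [hz]))]

theorem pv_foldl_insertBy_congr {α : Type} (p q : α → α → Bool) (l acc : List α)
    (h : ∀ a b, a ∈ l → (b ∈ l ∨ b ∈ acc) → p a b = q a b) :
    l.foldl (fun acc x => PySem.List.insertBy p x acc) acc
      = l.foldl (fun acc x => PySem.List.insertBy q x acc) acc := by
  induction l generalizing acc with
  | nil => rfl
  | cons a as ih =>
    simp only [List.foldl_cons]
    rw [pv_insertBy_congr p q a acc (fun y hy => h a y (by simp) (Or.inr hy))]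
    apply ih
    intro a' b' ha' hb'
    rcases hb' with hb' | hb'
    · exact h a' b' (by simp [ha']) (Or.inl (by simp [hb']))
    · rcases (PySem.List.mem_insertBy q a b' acc).mp hb' with hb | hb
      · subst hb; exact h a' b' (by simp [ha']) (Or.inl (by simp))
      · exact h a' b' (by simp [ha']) (Or.inr hb)

-- a stable sort only depends on the key's values on the list's members
theorem pv_sorted_congr (l : List Int) (k1 k2 : Int → Int) (h : ∀ x ∈ l, k1 x = k2 x) :
    PySem.List.sorted l k1 false = PySem.List.sorted l k2 false := by
  rw [PySem.List.sorted_eq_foldl_insertBy, PySem.List.sorted_eq_foldl_insertBy]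
  apply pv_foldl_insertBy_congr
  intro a b ha hb
  rcases hb with hb | hb
  · rw [h a ha, h b hb]
  · simp at hb

-- Python's stable reverse-sort on an Int key is the stable sort on the negated key
theorem pv_sorted_rev_neg {α : Type} (xs : List α) (key : α → Int) :
    PySem.List.sorted xs key true = PySem.List.sorted xs (fun x => -(key x)) false := by
  rw [PySem.List.sorted_rev_eq_foldl_insertBy, PySem.List.sorted_eq_foldl_insertBy]
  have : (fun (a b : α) => decide (key b < key a)) = (fun a b => decide (-(key a) < -(key b))) := by
    funext a b
    simp [neg_lt_neg_iff]
  rw [this]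

-- the assembled equivalence, over abstract draw-set families
theorem pv_assemble (LD R RT : List Int) (hLD : LD ≠ []) (hRT : RT.Nodup)
    (Pf Cf : Int → List Int) (hP : ∀ i, (Pf i).Nodup) (hC : ∀ i, (Cf i).Nodup) :
    List.map (fun (p : Int × Int) => p.1) (List.take 6
      (PySem.List.sorted
        ((LD.foldl (fun S n => RT.foldl (fun S t => S.modify t 0
            (· + ((R.foldl (fun T i => (Pf i).foldl (fun T p => (Cf i).foldl
                (fun T c => T.modify (p, c) 0 (· + 1)) T) T) PySem.Dict.empty).getD (n, t) 0))) S)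
          (PySem.Dict.empty : PySem.Dict Int Int)).items)
        (fun p => p.2) true))
    = List.take 6 (PySem.List.sorted RT (fun t =>
        -((((R.map (fun i => (PySem.Set.len (PySem.Set.inter LD (Pf i)), Cf i))).filter
              (fun s => PySem.Set.contains s.2 t)).map (fun s => s.1)).sum)) false) := by
  set trans : PySem.Dict (Int × Int) Int :=
    R.foldl (fun T i => (Pf i).foldl (fun T p => (Cf i).foldl
      (fun T c => T.modify (p, c) 0 (· + 1)) T) T) PySem.Dict.empty with htrans
  set SA : PySem.Dict Int Int :=
    LD.foldl (fun S n => RT.foldl (fun S t => S.modify t 0 (· + trans.getD (n, t) 0)) S)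
      PySem.Dict.empty with hSA
  set scoreB : Int → Int := fun t =>
    (((R.map (fun i => (PySem.Set.len (PySem.Set.inter LD (Pf i)), Cf i))).filter
        (fun s => PySem.Set.contains s.2 t)).map (fun s => s.1)).sum with hscoreB
  have hval : ∀ t ∈ RT, SA.getD t 0 = scoreB t := by
    intro t ht
    rw [hSA, pv_getD_scoresA LD RT hRT (fun n t => trans.getD (n, t) 0) PySem.Dict.empty t]
    simp only [PySem.Dict.getD_empty, zero_add]
    have e1 : (LD.map (fun n => if t ∈ RT then trans.getD (n, t) 0 else 0))
        = LD.map (fun n => (R.map (fun i => ((Pf i).count n : Int) * ((Cf i).count t : Int))).sum) := by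
      apply List.map_congr_left
      intro n _
      rw [if_pos ht, htrans, pv_getD_transFold R Pf Cf PySem.Dict.empty n t]
      simp
    rw [e1, pv_sum_swap LD R (fun n i => ((Pf i).count n : Int) * ((Cf i).count t : Int))]
    simp only [hscoreB, pv_sum_filter_map, List.map_map]
    apply congrArg
    apply List.map_congr_left
    intro i _
    rw [pv_inner LD (Pf i) (Cf i) (hP i) (hC i) t]
    by_cases htc : t ∈ Cf i
    · have hb : PySem.Set.contains (Cf i) t = true := (PySem.Set.contains_iff _ _).mpr htc
      simp only [Function.comp_apply, hb, if_true, if_pos htc]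
      rfl
    · have hb : ¬ (PySem.Set.contains (Cf i) t = true) :=
        fun h => htc ((PySem.Set.contains_iff _ _).mp h)
      simp only [Function.comp_apply, hb, if_false, if_neg htc]
      simp
  have hitems : SA.items = RT.map (fun t => (t, SA.getD t 0)) := by
    have hk := pv_keys_scoresA LD RT hLD hRT (fun n t => trans.getD (n, t) 0)
    rw [hSA, PySem.Dict.items_eq_map_keys _ (by rw [hk]; exact hRT) 0, hk]
  rw [hitems]
  rw [PySem.List.sorted_rev_eq_foldl_insertBy]
  rw [show ([] : List (Int × Int)) = ([] : List Int).map (fun t => (t, SA.getD t 0)) from rfl]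
  rw [pv_foldl_insertBy_map (fun t => (t, SA.getD t 0)) (fun (a b : Int × Int) => decide (b.2 < a.2)) RT []]
  rw [← List.map_take, List.map_map]
  have hid : ((fun (p : Int × Int) => p.1) ∘ (fun t => (t, SA.getD t 0))) = id := by
    funext t; rfl
  rw [hid, List.map_id]
  rw [← PySem.List.sorted_rev_eq_foldl_insertBy RT (fun t => SA.getD t 0)]
  rw [pv_sorted_rev_neg RT (fun t => SA.getD t 0)]
  rw [pv_sorted_congr RT (fun t => -(SA.getD t 0)) (fun t => -(scoreB t))
    (fun t ht => by show -SA.getD t 0 = -scoreB t; rw [hval t ht])]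

-- main lemma: on ≥ 2 draws with a nonempty last draw, A = B
theorem pv_main (history : List (List (String × List Int))) (max_num : Int)
    (hlen : ¬ history.length < 2)
    (hld : pvNums (PySem.List.pyGetD history 0 []) ≠ []) :
    method_markov_transition history max_num = method_markov_transition_alt history max_num := by
  simp only [method_markov_transition, method_markov_transition_alt, if_neg hlen]
  have hLD : PySem.Set.ofList (pvNums (PySem.List.pyGetD history 0 [])) ≠ [] := by
    cases h : pvNums (PySem.List.pyGetD history 0 []) with
    | nil => exact absurd h hld
    | cons x xs =>
      intro hc
      have := (PySem.Set.mem_ofList (x :: xs) x).mpr (by simp)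
      rw [hc] at this
      simp at this
  exact pv_assemble (PySem.Set.ofList (pvNums (PySem.List.pyGetD history 0 [])))
    (PySem.List.pyRange 1 ((history.length : Int) - 1) 1)
    (PySem.List.pyRange 1 (max_num + 1) 1)
    hLD (PySem.List.nodup_pyRange_one 1 (max_num + 1))
    (fun i => PySem.Set.ofList (pvNums (PySem.List.pyGetD history (i + 1) [])))
    (fun i => PySem.Set.ofList (pvNums (PySem.List.pyGetD history i [])))
    (fun i => PySem.Set.nodup_ofList _) (fun i => PySem.Set.nodup_ofList _)

-- ===== VERDICT (by name: the statement is the Claim_ definition above) =====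
theorem method_markov_transition_spec : Claim_equal_method_markov_transition := by
  intro history max_num _hdom hpre
  unfold Spec_method_markov_transition
  by_cases hlen : history.length < 2
  · simp only [method_markov_transition, method_markov_transition_alt, if_pos hlen]
  · rcases hpre with h1 | ⟨hld, _⟩
    · omega
    · exact pv_main history max_num hlen hld
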